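-- pv_equiv track=rewrite | github.com/ResoTheRed/Genetic_Algorithm_Protein_Structures | GeneticAlg.py | split_chormosome
-- ===== SOURCE A (Python) =====
-- def split_chormosome(chrom, cross_index):
-- 	seg_temp = list()
-- 	body_temp = {}
-- 	key = ""
-- 	count = 0
-- 	for k,v in chrom.items():
-- 		# load the smaller sections exclude fit attribute
-- 		if count <= cross_index and k != "fit":
-- 			seg_temp.append(k+","+v)
-- 		elif k != "fit":
-- 			body_temp[k] = v
-- 			if count == cross_index+1:
-- 				key = k
-- 		count+=1
-- 	return seg_temp, body_temp, key
-- ===== SOURCE B (Python) =====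
-- def split_chormosome(chrom, cross_index):
--     items = list(chrom.items())
--     cut = max(min(cross_index + 1, len(items)), 0)
--     head, tail = items[:cut], items[cut:]
--     seg_temp = [k + "," + v for k, v in head if k != "fit"]
--     body_temp = {k: v for k, v in tail if k != "fit"}
--     p = cross_index + 1
--     key = items[p][0] if 0 <= p < len(items) and items[p][0] != "fit" else ""
--     return seg_temp, body_temp, key
-- ===== Notes on version B (the rewrite author's own statement) =====
-- stated objective: simpler
-- what changed: Replaces A's single pass with a running position counter and three in-loop branches by a slice-based partition at the crossover point plus a direct boundary lookup for the key.
import Mathlib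
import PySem

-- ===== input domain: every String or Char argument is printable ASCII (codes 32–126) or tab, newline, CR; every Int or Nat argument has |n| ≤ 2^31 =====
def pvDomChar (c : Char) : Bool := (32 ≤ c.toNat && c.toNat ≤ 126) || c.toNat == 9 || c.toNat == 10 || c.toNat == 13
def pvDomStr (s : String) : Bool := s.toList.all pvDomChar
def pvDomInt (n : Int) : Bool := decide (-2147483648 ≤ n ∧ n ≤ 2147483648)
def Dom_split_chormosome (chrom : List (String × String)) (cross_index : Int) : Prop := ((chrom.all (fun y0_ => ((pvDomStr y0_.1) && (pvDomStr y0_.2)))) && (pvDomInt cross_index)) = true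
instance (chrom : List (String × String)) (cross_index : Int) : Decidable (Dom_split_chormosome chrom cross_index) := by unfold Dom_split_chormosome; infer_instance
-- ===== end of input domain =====

-- B partitions by slicing instead of A's running counter; same return value (simpler decomposition, not faster).

-- ===== PORT A =====
-- the loop body of A: state (seg_temp, body_temp, key, count)
def splitStepA (cross_index : Int)
    (st : List String × PySem.Dict String String × String × Int) (kv : String × String) :
    List String × PySem.Dict String String × String × Int :=
  match st, kv with
  | (seg, body, key, count), (k, v) =>
    if count ≤ cross_index ∧ k ≠ "fit" then
      (seg ++ [k ++ "," ++ v], body, key, count + 1)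
    else if k ≠ "fit" then
      (seg, body.insert k v, (if count = cross_index + 1 then k else key), count + 1)
    else
      (seg, body, key, count + 1)

def split_chormosome (chrom : List (String × String)) (cross_index : Int) : List String × (List (String × String)) × String :=
  match chrom.foldl (splitStepA cross_index) ([], PySem.Dict.empty, "", 0) with
  | (seg, body, key, _) => (seg, body.items, key)

-- ===== PORT B =====
def split_chormosome_alt (chrom : List (String × String)) (cross_index : Int) : List String × (List (String × String)) × String :=
  let items := chrom
  -- cut = max(min(cross_index+1, len(items)), 0); items[:cut] / items[cut:] with 0 ≤ cut ≤ len are take/drop (exact)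
  let cut : Int := max (min (cross_index + 1) (items.length : Int)) 0
  let head := items.take cut.toNat
  let tail := items.drop cut.toNat
  let seg_temp := (head.filter (fun p => p.1 != "fit")).map (fun p => p.1 ++ "," ++ p.2)
  let body_temp := (tail.filter (fun p => p.1 != "fit")).foldl (fun d p => d.insert p.1 p.2) PySem.Dict.empty
  let p := cross_index + 1
  let key := if 0 ≤ p ∧ p < (items.length : Int) ∧ (items.getD p.toNat ("", "")).1 ≠ "fit"
             then (items.getD p.toNat ("", "")).1 else ""
  (seg_temp, body_temp.items, key)

-- ===== PRECONDITION & SPEC =====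
def Spec_split_chormosome (chrom : List (String × String)) (cross_index : Int) (out : List String × (List (String × String)) × String) : Prop := out = split_chormosome_alt chrom cross_index
instance (chrom : List (String × String)) (cross_index : Int) (out : List String × (List (String × String)) × String) : Decidable (Spec_split_chormosome chrom cross_index out) := by unfold Spec_split_chormosome; infer_instance

-- ===== CLAIM (what is proved, stated in full; the proofs are below) =====
def Claim_equal_split_chormosome : Prop := ∀ (chrom : List (String × String)) (cross_index : Int), Dom_split_chormosome chrom cross_index → Spec_split_chormosome chrom cross_index (split_chormosome chrom cross_index)

-- ===== LEMMAS AND PROOFS =====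

-- invariant of A's fold: from counter value c it realises the slice split at (cross_index + 1 - c)
theorem splitFoldA_eq (cross_index : Int) :
    ∀ (l : List (String × String)) (seg : List String) (body : PySem.Dict String String)
      (key : String) (c : Int),
    l.foldl (splitStepA cross_index) (seg, body, key, c) =
      ( seg ++ ((l.take (cross_index + 1 - c).toNat).filter (fun p => p.1 != "fit")).map
            (fun p => p.1 ++ "," ++ p.2),
        ((l.drop (cross_index + 1 - c).toNat).filter (fun p => p.1 != "fit")).foldl
            (fun d p => d.insert p.1 p.2) body,
        (if 0 ≤ cross_index + 1 - c ∧ cross_index + 1 - c < (l.length : Int) ∧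
              (l.getD (cross_index + 1 - c).toNat ("", "")).1 ≠ "fit"
         then (l.getD (cross_index + 1 - c).toNat ("", "")).1 else key),
        c + (l.length : Int) ) := by
  intro l
  induction l with
  | nil =>
    intro seg body key c
    simp only [List.foldl_nil, List.take_nil, List.drop_nil, List.filter_nil, List.map_nil,
      List.append_nil, List.length_nil, List.getD_nil, Nat.cast_zero, Int.add_zero]
    simp only [Prod.mk.injEq]
    refine ⟨trivial, trivial, ?_, trivial⟩
    rw [if_neg (by rintro ⟨ha, hb, hx⟩; omega)]
  | cons hd t ih =>
    intro seg body key c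
    obtain ⟨k, v⟩ := hd
    rw [List.foldl_cons]
    have hshift : cross_index + 1 - (c + 1) = cross_index - c := by ring
    by_cases hc : c ≤ cross_index
    · -- counter still in the head segment
      have h1 : (cross_index + 1 - c).toNat = (cross_index - c).toNat + 1 := by omega
      have hgetD : ((k, v) :: t).getD (cross_index + 1 - c).toNat ("", "")
          = t.getD (cross_index - c).toNat ("", "") := by
        rw [h1]; exact List.getD_cons_succ
      have hkey : (if 0 ≤ cross_index + 1 - c ∧ cross_index + 1 - c < ((((k, v) :: t)).length : Int) ∧
              ((((k, v) :: t)).getD (cross_index + 1 - c).toNat ("", "")).1 ≠ "fit"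
           then (((k, v) :: t).getD (cross_index + 1 - c).toNat ("", "")).1 else key)
          = (if 0 ≤ cross_index - c ∧ cross_index - c < (t.length : Int) ∧
              (t.getD (cross_index - c).toNat ("", "")).1 ≠ "fit"
           then (t.getD (cross_index - c).toNat ("", "")).1 else key) := by
        rw [hgetD]
        congr 1
        apply propext
        constructor <;> rintro ⟨ha, hb, hx⟩ <;>
          exact ⟨by omega, by simp [List.length_cons] at hb ⊢; omega, hx⟩
      by_cases hk : k = "fit"
      · have hstep : splitStepA cross_index (seg, body, key, c) (k, v) = (seg, body, key, c + 1) := by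
          simp [splitStepA, hk]
        rw [hstep, ih, hshift, hkey]
        simp only [Prod.mk.injEq]
        refine ⟨?_, ?_, trivial, ?_⟩
        · simp [h1, List.take_succ_cons, hk]
        · simp [h1, List.drop_succ_cons]
        · simp; omega
      · have hstep : splitStepA cross_index (seg, body, key, c) (k, v)
            = (seg ++ [k ++ "," ++ v], body, key, c + 1) := by
          simp [splitStepA, hc, hk]
        rw [hstep, ih, hshift, hkey]
        simp only [Prod.mk.injEq]
        refine ⟨?_, ?_, trivial, ?_⟩
        · simp [h1, List.take_succ_cons, hk]
        · simp [h1, List.drop_succ_cons]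
        · simp; omega
    · -- counter already past the crossover point
      have h0 : (cross_index + 1 - c).toNat = 0 := by omega
      have h0' : (cross_index - c).toNat = 0 := by omega
      by_cases hk : k = "fit"
      · have hstep : splitStepA cross_index (seg, body, key, c) (k, v) = (seg, body, key, c + 1) := by
          simp [splitStepA, hk]
        rw [hstep, ih, hshift]
        simp only [Prod.mk.injEq, h0, h0', List.take_zero, List.drop_zero, List.filter_cons]
        refine ⟨by simp, by simp [hk], ?_, by simp; omega⟩
        rw [if_neg, if_neg]
        · rintro ⟨ha, hb, hx⟩
          exact hx (by simp [hk])
        · rintro ⟨ha, hb, hx⟩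
          omega
      · by_cases he : c = cross_index + 1
        · have hstep : splitStepA cross_index (seg, body, key, c) (k, v)
              = (seg, body.insert k v, k, c + 1) := by
            simp [splitStepA, hc, hk, he]
          rw [hstep, ih, hshift]
          simp only [Prod.mk.injEq, h0, h0', List.take_zero, List.drop_zero, List.filter_cons]
          refine ⟨by simp, by simp [hk], ?_, by simp; omega⟩
          rw [if_neg (by rintro ⟨ha, hb, hx⟩; omega),
              if_pos ⟨by omega, by simp [List.length_cons]; omega, by simp [hk]⟩]
          simp
        · have hstep : splitStepA cross_index (seg, body, key, c) (k, v)
              = (seg, body.insert k v, key, c + 1) := by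
            simp [splitStepA, hc, hk, he]
          rw [hstep, ih, hshift]
          simp only [Prod.mk.injEq, h0, h0', List.take_zero, List.drop_zero, List.filter_cons]
          refine ⟨by simp, by simp [hk], ?_, by simp; omega⟩
          rw [if_neg (by rintro ⟨ha, hb, hx⟩; omega),
              if_neg (by rintro ⟨ha, hb, hx⟩; omega)]

-- ===== VERDICT (by name: the statement is the Claim_ definition above) =====
theorem split_chormosome_spec : Claim_equal_split_chormosome := by
  intro chrom cross_index _
  unfold Spec_split_chormosome split_chormosome split_chormosome_alt
  rw [splitFoldA_eq]
  simp only [Int.sub_zero]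
  have ht : chrom.take (cross_index + 1).toNat
      = chrom.take (max (min (cross_index + 1) (chrom.length : Int)) 0).toNat := by
    rw [List.take_eq_take_min]; congr 1; omega
  have hd : chrom.drop (cross_index + 1).toNat
      = chrom.drop (max (min (cross_index + 1) (chrom.length : Int)) 0).toNat := by
    rw [List.drop_eq_drop_min]; congr 1; omega
  rw [ht, hd]
  simp
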